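-- pv_equiv track=rewrite | github.com/MindDevastation/factory-vm | services/track_analysis_report/xlsx_export.py | build_group_header_spans
-- ===== SOURCE A (Python) =====
-- from collections.abc import Sequence
-- from typing import Any
--
-- def build_group_header_spans(columns: Sequence[dict[str, Any]]) -> list[tuple[int, int, str]]:
--     spans: list[tuple[int, int, str]] = []
--     if not columns:
--         return spans
--
--     start_idx = 1
--     current_group = str(columns[0].get("group") or "")
--     for idx, col in enumerate(columns[1:], start=2):
--         next_group = str(col.get("group") or "")
--         if next_group != current_group:
--             spans.append((start_idx, idx - 1, current_group))
--             start_idx = idx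
--             current_group = next_group
--     spans.append((start_idx, len(columns), current_group))
--     return spans
-- ===== SOURCE B (Python) =====
-- def build_group_header_spans(columns):
--     # Right-to-left: build the span list back-to-front, extending the front
--     # span when the key matches, otherwise prepending a new unit span.
--     spans = []
--     pos = len(columns)
--     for col in reversed(columns):
--         key = str(col.get("group") or "")
--         if spans and spans[0][2] == key:
--             spans[0] = (pos, spans[0][1], key)
--         else:
--             spans.insert(0, (pos, pos, key))
--         pos -= 1
--     return spans
-- ===== Notes on version B (the rewrite author's own statement) =====
-- stated objective: alternative
-- what changed: B traverses the columns RIGHT-TO-LEFT and builds the span list back-to-front: it extends the front span when its key matches the current column, otherwise prepends a new unit span; A's left-to-right start-index/current-group state machine that emits a span on each key change is gone.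
import Mathlib
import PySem

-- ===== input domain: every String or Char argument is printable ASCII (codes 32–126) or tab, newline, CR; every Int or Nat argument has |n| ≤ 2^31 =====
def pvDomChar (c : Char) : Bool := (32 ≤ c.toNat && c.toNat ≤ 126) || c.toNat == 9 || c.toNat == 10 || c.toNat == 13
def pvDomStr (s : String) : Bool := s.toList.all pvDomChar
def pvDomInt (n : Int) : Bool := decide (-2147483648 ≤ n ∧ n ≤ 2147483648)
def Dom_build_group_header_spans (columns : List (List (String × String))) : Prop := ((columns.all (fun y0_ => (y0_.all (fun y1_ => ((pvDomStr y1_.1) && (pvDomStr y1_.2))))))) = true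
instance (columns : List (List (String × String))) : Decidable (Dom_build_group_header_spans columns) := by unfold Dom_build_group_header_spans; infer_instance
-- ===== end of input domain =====

-- B traverses the columns right-to-left, building the spans back-to-front (extend the
-- front span on a key match, else prepend a unit span); return values proved equal to A's.

-- str(col.get("group") or ""): for a String value v, `v or ""` is v unless v is "" (falsy),
-- and str is the identity on strings, so the key is the looked-up value or "" when absent/empty.
def pvKeyOf (col : List (String × String)) : String :=
  ((PySem.Dict.mk col).get? "group").getD ""

-- ===== PORT A =====
def build_group_header_spans (columns : List (List (String × String))) : List (Int × Int × String) :=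
  match columns with
  | [] => []
  | c0 :: rest =>
    let st :=
      (PySem.List.enumerate rest 2).foldl
        (fun (st : List (Int × Int × String) × Int × String) p =>
          let next_group := pvKeyOf p.2
          if next_group ≠ st.2.2 then
            (st.1 ++ [(st.2.1, p.1 - 1, st.2.2)], p.1, next_group)
          else st)
        ([], 1, pvKeyOf c0)
    st.1 ++ [(st.2.1, (columns.length : Int), st.2.2)]

-- ===== PORT B =====
-- one step of B's loop body, on the key of the current column (state = spans, pos)
def pvStepK (key : String) (st : List (Int × Int × String) × Int) :
    List (Int × Int × String) × Int :=
  match st.1 with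
  | (_, e, k) :: rest =>
      if k = key then ((st.2, e, k) :: rest, st.2 - 1)
      else ((st.2, st.2, key) :: (st.1), st.2 - 1)
  | [] => ([(st.2, st.2, key)], st.2 - 1)

-- `for col in reversed(columns)` = foldl over columns.reverse
def build_group_header_spans_alt (columns : List (List (String × String))) : List (Int × Int × String) :=
  (columns.reverse.foldl (fun st col => pvStepK (pvKeyOf col) st)
    ([], (columns.length : Int))).1

-- ===== PRECONDITION & SPEC =====
def Spec_build_group_header_spans (columns : List (List (String × String))) (out : List (Int × Int × String)) : Prop := out = build_group_header_spans_alt columns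
instance (columns : List (List (String × String))) (out : List (Int × Int × String)) : Decidable (Spec_build_group_header_spans columns out) := by unfold Spec_build_group_header_spans; infer_instance

-- ===== CLAIM (what is proved, stated in full; the proofs are below) =====
def Claim_equal_build_group_header_spans : Prop := ∀ (columns : List (List (String × String))), Dom_build_group_header_spans columns → Spec_build_group_header_spans columns (build_group_header_spans columns)

-- ===== LEMMAS AND PROOFS =====

-- recursive characterisation of A's loop over the key list
def pvF (g : String) (start idx : Int) : List String → List (Int × Int × String)
  | [] => [(start, idx - 1, g)]
  | k :: ks => if k ≠ g then (start, idx - 1, g) :: pvF k idx (idx + 1) ks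
               else pvF g start (idx + 1) ks

-- spans produced from (key, length) runs starting at position pos
def pvGS (pos : Int) : List (String × Nat) → List (Int × Int × String)
  | [] => []
  | (k, n) :: rs => (pos, pos + (n : Int) - 1, k) :: pvGS (pos + (n : Int)) rs

-- runs of the key list
def pvKRuns : List String → List (String × Nat)
  | [] => []
  | k :: ks => (k, (ks.takeWhile (· = k)).length + 1) :: pvKRuns (ks.dropWhile (· = k))
termination_by l => l.length
decreasing_by
  simpa using Nat.lt_succ_of_le (List.length_dropWhile_le _ _)

-- A's fold, with the final append, equals acc ++ pvF …
theorem pvA_loop (rest : List (List (String × String)))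
    (acc : List (Int × Int × String)) (start : Int) (g : String) (idx : Int) :
    (let st := (PySem.List.enumerate rest idx).foldl
        (fun (st : List (Int × Int × String) × Int × String) p =>
          let next_group := pvKeyOf p.2
          if next_group ≠ st.2.2 then
            (st.1 ++ [(st.2.1, p.1 - 1, st.2.2)], p.1, next_group)
          else st) (acc, start, g)
     st.1 ++ [(st.2.1, idx - 1 + (rest.length : Int), st.2.2)])
    = acc ++ pvF g start idx (rest.map pvKeyOf) := by
  induction rest generalizing acc start g idx with
  | nil => simp [PySem.List.enumerate_nil, pvF]
  | cons c cs ih =>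
    rw [PySem.List.enumerate_cons]
    simp only [List.foldl_cons, List.map_cons, pvF]
    by_cases h : pvKeyOf c ≠ g
    · simp only [if_pos h]
      have := ih (acc ++ [(start, idx - 1, g)]) idx (pvKeyOf c) (idx + 1)
      simp only [] at this ⊢
      rw [show idx + 1 - 1 + (cs.length : Int) = idx - 1 + ((c :: cs).length : Int) by
        simp only [List.length_cons]; push_cast; ring] at this
      rw [this, List.append_assoc, List.singleton_append]
    · simp only [if_neg h]
      have := ih acc start g (idx + 1)
      simp only [] at this ⊢
      rw [show idx + 1 - 1 + (cs.length : Int) = idx - 1 + ((c :: cs).length : Int) by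
        simp only [List.length_cons]; push_cast; ring] at this
      rw [this]

-- the bridge on A's side: the state machine yields exactly the spans of the runs
theorem pvF_eq_gs (ks : List String) (g : String) (start : Int) (m : Nat) :
    pvF g start (start + (m : Int)) ks
      = pvGS start ((g, m + (ks.takeWhile (· = g)).length) :: pvKRuns (ks.dropWhile (· = g))) := by
  induction ks generalizing g start m with
  | nil => simp [pvF, pvGS, pvKRuns]
  | cons k ks ih =>
    by_cases h : k = g
    · subst h
      rw [pvF, if_neg (by simp),
        show start + (m : Int) + 1 = start + ((m + 1 : Nat) : Int) by push_cast; ring,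
        ih _ _ (m + 1)]
      simp only [List.takeWhile_cons, List.dropWhile_cons, decide_true, if_true]
      simp only [List.length_cons, pvGS, List.cons.injEq, Prod.mk.injEq]
      and_intros <;> first | trivial | (push_cast; ring)
    · rw [pvF, if_pos (by simpa using h)]
      have hks := ih k (start + (m : Int)) 1
      rw [show start + (m : Int) + ((1 : Nat) : Int) = start + (m : Int) + 1 by norm_num] at hks
      rw [hks]
      simp only [List.takeWhile_cons, List.dropWhile_cons, decide_eq_true_eq, if_neg h,
        List.length_nil, pvGS, pvKRuns, List.cons.injEq, Prod.mk.injEq]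
      and_intros <;> first | trivial | (push_cast; ring)

theorem pvA_eq_gs (columns : List (List (String × String))) :
    build_group_header_spans columns = pvGS 1 (pvKRuns (columns.map pvKeyOf)) := by
  cases columns with
  | nil => simp [build_group_header_spans, pvKRuns, pvGS]
  | cons c0 rest =>
    simp only [build_group_header_spans]
    have hA := pvA_loop rest [] 1 (pvKeyOf c0) 2
    simp only [List.nil_append] at hA
    rw [show ((c0 :: rest).length : Int) = 2 - 1 + (rest.length : Int) by
      simp only [List.length_cons]; push_cast; ring]
    rw [hA]
    rw [List.map_cons, pvKRuns]
    have hF := pvF_eq_gs (rest.map pvKeyOf) (pvKeyOf c0) 1 1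
    rw [show (1 : Int) + ((1 : Nat) : Int) = 2 by norm_num] at hF
    rw [hF]
    simp [Nat.add_comm]

-- the bridge on B's side, one step: applying pvStepK k to the spans of ks starting
-- at position q+1 gives the spans of k :: ks starting at position q
theorem pvStep_gs (k : String) (ks : List String) (q : Int) :
    pvStepK k (pvGS (q + 1) (pvKRuns ks), q) = (pvGS q (pvKRuns (k :: ks)), q - 1) := by
  cases ks with
  | nil =>
    simp only [pvKRuns, pvGS, pvStepK, List.takeWhile_nil, List.dropWhile_nil,
      List.length_nil, Nat.zero_add, Nat.cast_one]
    norm_num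
  | cons c cs =>
    by_cases h : c = k
    · subst h
      rw [pvKRuns, pvGS, pvStepK]
      simp only [if_pos rfl]
      rw [pvKRuns]
      simp only [List.takeWhile_cons, List.dropWhile_cons, decide_true, if_true,
        List.length_cons]
      rw [pvGS]
      refine congrArg₂ Prod.mk (congrArg₂ List.cons ?_ ?_) rfl
      · refine congrArg₂ Prod.mk rfl (congrArg₂ Prod.mk ?_ rfl)
        push_cast; ring
      · refine congrArg₂ pvGS ?_ rfl
        push_cast; ring
    · rw [pvKRuns, pvGS, pvStepK]
      simp only []
      rw [if_neg h]
      rw [pvKRuns]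
      simp only [List.takeWhile_cons, List.dropWhile_cons, decide_eq_true_eq, if_neg h,
        List.length_nil, Nat.zero_add, Nat.cast_one]
      rw [pvGS]
      refine congrArg₂ Prod.mk (congrArg₂ List.cons ?_ ?_) rfl
      · refine congrArg₂ Prod.mk rfl (congrArg₂ Prod.mk ?_ rfl)
        ring
      · rw [pvKRuns, pvGS]
        refine congrArg₂ List.cons ?_ (congrArg₂ pvGS ?_ rfl)
        · refine congrArg₂ Prod.mk rfl (congrArg₂ Prod.mk ?_ rfl)
          push_cast; ring
        · push_cast; ring

-- folding pvStepK from the right yields the spans of the runs, the LAST position being p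
theorem pvB_foldr (ks : List String) (p : Int) :
    ks.foldr pvStepK ([], p)
      = (pvGS (p - (ks.length : Int) + 1) (pvKRuns ks), p - (ks.length : Int)) := by
  induction ks generalizing p with
  | nil => simp [pvKRuns, pvGS]
  | cons k ks ih =>
    rw [List.foldr_cons, ih p]
    have h1 : p - ((ks.length : Nat) : Int) = (p - ((k :: ks).length : Int) + 1) := by
      simp only [List.length_cons]; push_cast; ring
    rw [show (pvGS (p - (ks.length : Int) + 1) (pvKRuns ks), p - (ks.length : Int))
        = (pvGS ((p - ((k :: ks).length : Int) + 1) + 1) (pvKRuns ks),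
           p - ((k :: ks).length : Int) + 1) by rw [← h1]]
    rw [pvStep_gs]
    simp only [add_sub_cancel_right]

theorem pvB_eq_gs (columns : List (List (String × String))) :
    build_group_header_spans_alt columns = pvGS 1 (pvKRuns (columns.map pvKeyOf)) := by
  unfold build_group_header_spans_alt
  rw [List.foldl_reverse]
  have : (columns.foldr (fun col st => pvStepK (pvKeyOf col) st) ([], (columns.length : Int)))
      = (columns.map pvKeyOf).foldr pvStepK ([], (columns.length : Int)) := by
    rw [List.foldr_map]
  rw [this, pvB_foldr]
  simp

-- ===== VERDICT (by name: the statement is the Claim_ definition above) =====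
theorem build_group_header_spans_spec : Claim_equal_build_group_header_spans := by
  intro columns _
  unfold Spec_build_group_header_spans
  rw [pvA_eq_gs, pvB_eq_gs]
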